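-- pv_equiv track=rewrite | github.com/1arie1/ctac | src/ctac/transform/pin_naming.py | _informative_positions
-- ===== SOURCE A (Python) =====
-- from collections.abc import Iterable, Mapping
--
-- def _informative_positions(token_lists: Iterable[tuple[str, ...]]) -> tuple[bool, ...]:
--     """For each position i, ``True`` iff multiple distinct values appear
--     across the input token lists. Absence (``i >= len(toks)``) counts as
--     a distinct ``None`` value.
--     """
--     lists = list(token_lists)
--     if not lists:
--         return ()
--     max_len = max((len(t) for t in lists), default=0)
--     out: list[bool] = []
--     for i in range(max_len):
--         values: set[str | None] = set()
--         for t in lists: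
--             values.add(t[i] if i < len(t) else None)
--         out.append(len(values) > 1)
--     return tuple(out)
-- ===== SOURCE B (Python) =====
-- def _informative_positions(token_lists):
--     """For each position i, ``True`` iff multiple distinct values appear
--     across the input token lists (absence counts as None).
--
--     Row-major streaming merge: fold the lists into a per-position state of
--     (first value seen, differing value seen?) pairs, tracking the minimum
--     length; position i also has a None value exactly when i >= min length.
--     """
--     lists = list(token_lists)
--     if not lists:
--         return ()
--     state = []  # per position: (first value seen there, True iff a different value was seen)
--     min_len = len(lists[0])
--     for t in lists:
--         state = [(v, d or (i < len(t) and t[i] != v))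
--                  for i, (v, d) in enumerate(state)] \
--                 + [(w, False) for w in t[len(state):]]
--         if len(t) < min_len:
--             min_len = len(t)
--     return tuple(d or i >= min_len for i, (v, d) in enumerate(state))
-- ===== Notes on version B (the rewrite author's own statement) =====
-- stated objective: alternative
-- what changed: A scans column-by-column building a set of values per position; B makes a single row-major pass folding each list into a per-position (first value, differs?) accumulator and a running minimum length, then reads the answer as differs-or-(i >= min length), so no per-column set is ever built.
import Mathlib
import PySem

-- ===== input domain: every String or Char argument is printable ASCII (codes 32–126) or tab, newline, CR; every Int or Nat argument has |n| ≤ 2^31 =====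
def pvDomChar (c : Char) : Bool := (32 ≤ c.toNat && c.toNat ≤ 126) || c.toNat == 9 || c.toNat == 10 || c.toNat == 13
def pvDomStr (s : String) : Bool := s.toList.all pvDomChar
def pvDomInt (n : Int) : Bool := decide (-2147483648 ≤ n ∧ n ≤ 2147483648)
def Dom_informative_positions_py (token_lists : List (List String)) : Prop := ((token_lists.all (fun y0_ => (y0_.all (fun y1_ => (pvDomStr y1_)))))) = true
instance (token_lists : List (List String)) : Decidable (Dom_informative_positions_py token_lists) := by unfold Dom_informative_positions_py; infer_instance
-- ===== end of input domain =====

-- B replaces A's column-by-column set building with a single row-major fold into a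
-- per-position (first value, differing value seen?) accumulator plus a running minimum
-- length (a position also holds None exactly when i >= min length); same results.

-- ===== PORT A =====
def pyValA (t : List String) (i : Int) : Option String :=
  if i < (t.length : Int) then PySem.List.pyGet? t i else none

def informative_positions_py (token_lists : List (List String)) : List Bool :=
  let lists := token_lists
  if lists = [] then []
  else
    let max_len := (PySem.List.max? (lists.map (fun t => (t.length : Int))) (fun x => x)).getD 0
    (PySem.List.pyRange 0 max_len 1).foldl
      (fun out i =>
        let values : PySem.Set (Option String) :=
          lists.foldl (fun s t => PySem.Set.add s (pyValA t i)) PySem.Set.empty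
        out ++ [decide (1 < PySem.Set.len values)]) []

-- ===== PORT B =====
-- one merge step of Source B's loop body: update every existing position against t
-- (t[i] read with pyGetD, valid under the i < len(t) guard; t[len(state):] is a drop)
def altStep (state : List (String × Bool)) (t : List String) : List (String × Bool) :=
  ((PySem.List.enumerate state).map (fun p =>
      (p.2.1, p.2.2 || (decide (p.1 < (t.length : Int)) && (PySem.List.pyGetD t p.1 "" != p.2.1)))))
  ++ (t.drop state.length).map (fun w => (w, false))

def informative_positions_py_alt (token_lists : List (List String)) : List Bool :=
  match token_lists with
  | [] => []
  | h :: _ =>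
    let res := token_lists.foldl
      (fun (acc : List (String × Bool) × Nat) t =>
        (altStep acc.1 t, if t.length < acc.2 then t.length else acc.2))
      ([], h.length)
    (PySem.List.enumerate res.1).map (fun p => p.2.2 || decide ((res.2 : Int) ≤ p.1))

-- ===== PRECONDITION & SPEC =====
def Spec_informative_positions_py (token_lists : List (List String)) (out : List Bool) : Prop := out = informative_positions_py_alt token_lists
instance (token_lists : List (List String)) (out : List Bool) : Decidable (Spec_informative_positions_py token_lists out) := by unfold Spec_informative_positions_py; infer_instance

-- ===== CLAIM (what is proved, stated in full; the proofs are below) =====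
def Claim_equal_informative_positions_py : Prop := ∀ (token_lists : List (List String)), Dom_informative_positions_py token_lists → Spec_informative_positions_py token_lists (informative_positions_py token_lists)

-- ===== LEMMAS AND PROOFS =====

-- value at position i with absence as none (Nat-index view of pyValA)
def pyValB (t : List String) (i : Nat) : Option String :=
  if i < t.length then t[i]? else none

-- the first value appearing at position i across the lists (none if all too short)
def firstAt (L : List (List String)) (i : Nat) : Option String :=
  (L.find? (fun t => decide (i < t.length))).map (fun t => t.getD i "")

-- some list has a token at i differing from v
def anyDiff (L : List (List String)) (i : Nat) (v : String) : Bool :=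
  L.any (fun t => decide (i < t.length) && (t.getD i "" != v))

theorem len_le_foldl_add {β : Type} [BEq β] (vs : List β) (s : PySem.Set β) :
    s.length ≤ (vs.foldl PySem.Set.add s).length := by
  induction vs generalizing s with
  | nil => simp
  | cons u vs ih =>
    refine le_trans ?_ (ih (PySem.Set.add s u))
    unfold PySem.Set.add
    split <;> simp

theorem one_lt_foldl_add {β : Type} [DecidableEq β] [BEq β] [LawfulBEq β]
    (v : β) (vs : List β) :
    1 < (vs.foldl PySem.Set.add [v]).length ↔ ∃ u ∈ vs, u ≠ v := by
  induction vs with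
  | nil => simp
  | cons u vs ih =>
    by_cases h : u = v
    · subst h
      have hadd : PySem.Set.add [u] u = [u] := PySem.Set.add_of_mem (by simp)
      simp [List.foldl_cons, ih]
    · have hadd : PySem.Set.add [v] u = [v, u] := PySem.Set.add_of_not_mem (by simp [h])
      simp only [List.foldl_cons, hadd]
      constructor
      · intro _; exact ⟨u, by simp, h⟩
      · intro _
        have := len_le_foldl_add vs ([v, u] : PySem.Set β)
        simp at this
        omega

theorem pyVal_cast (t : List String) (k : Nat) : pyValA t (k : Int) = pyValB t k := by
  simp [pyValA, pyValB]
theorem altStep_length (s : List (String × Bool)) (t : List String) :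
    (altStep s t).length = max s.length t.length := by
  simp [altStep, PySem.List.length_enumerate]
  omega

theorem fold_length (L : List (List String)) (s : List (String × Bool)) :
    (L.foldl altStep s).length = L.foldl (fun m t => max m t.length) s.length := by
  induction L generalizing s with
  | nil => rfl
  | cons t L ih => simp [List.foldl_cons, ih, altStep_length]

theorem min_fold_le (L : List (List String)) (acc i : Nat) :
    (L.foldl (fun m t => if t.length < m then t.length else m) acc ≤ i) ↔
      acc ≤ i ∨ ∃ t ∈ L, t.length ≤ i := by
  induction L generalizing acc with
  | nil => simp
  | cons t L ih =>
    simp only [List.foldl_cons, ih, List.mem_cons]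
    constructor
    · rintro (h | h)
      · split at h
        · right; exact ⟨t, Or.inl rfl, by omega⟩
        · left; exact h
      · obtain ⟨u, hu, hl⟩ := h; exact Or.inr ⟨u, Or.inr hu, hl⟩
    · rintro (h | ⟨u, (rfl | hu), hl⟩)
      · left; split <;> omega
      · left; split <;> omega
      · exact Or.inr ⟨u, hu, hl⟩

theorem lt_max_fold (L : List (List String)) (acc i : Nat) :
    (i < L.foldl (fun m t => max m t.length) acc) ↔
      i < acc ∨ ∃ t ∈ L, i < t.length := by
  induction L generalizing acc with
  | nil => simp
  | cons t L ih =>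
    simp only [List.foldl_cons, ih, List.mem_cons]
    constructor
    · rintro (h | h)
      · rcases lt_max_iff.mp h with h | h
        · exact Or.inl h
        · exact Or.inr ⟨t, Or.inl rfl, h⟩
      · obtain ⟨u, hu, hl⟩ := h; exact Or.inr ⟨u, Or.inr hu, hl⟩
    · rintro (h | ⟨u, (rfl | hu), hl⟩)
      · exact Or.inl (lt_max_iff.mpr (Or.inl h))
      · exact Or.inl (lt_max_iff.mpr (Or.inr hl))
      · exact Or.inr ⟨u, hu, hl⟩

theorem foldl_max_cast (rest : List (List String)) (a : Nat) :
    List.foldl max ((a : Int)) (rest.map (fun t => (t.length : Int)))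
      = ((rest.foldl (fun m t => max m t.length) a : Nat) : Int) := by
  induction rest generalizing a with
  | nil => rfl
  | cons u rest ih =>
    simp only [List.map_cons, List.foldl_cons, ← Nat.cast_max, ih]

theorem max?_int_lens (h : List String) (rest : List (List String)) :
    (PySem.List.max? ((h :: rest).map (fun t => (t.length : Int))) (fun x => x)).getD 0
      = (((h :: rest).foldl (fun m t => max m t.length) 0 : Nat) : Int) := by
  rw [List.map_cons, PySem.List.max?_id_cons]
  simp only [Option.getD_some, List.foldl_cons, Nat.zero_max]
  exact foldl_max_cast rest h.length
theorem altStep_get (s : List (String × Bool)) (t : List String) (i : Nat) :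
    (altStep s t)[i]? =
      match s[i]? with
      | some (v, d) => some (v, d || (decide (i < t.length) && (t.getD i "" != v)))
      | none => if i < t.length then some (t.getD i "", false) else none := by
  unfold altStep
  by_cases hi : i < s.length
  · rw [List.getElem?_append_left (by simpa [PySem.List.length_enumerate] using hi)]
    rw [List.getElem?_map, PySem.List.getElem?_enumerate]
    have : s[i]? = some s[i] := List.getElem?_eq_getElem hi
    simp [this, List.getD_eq_getElem?_getD]
  · rw [List.getElem?_append_right (by simp [PySem.List.length_enumerate]; omega)]
    have hs : s[i]? = none := List.getElem?_eq_none (by omega)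
    simp only [List.length_map, PySem.List.length_enumerate, hs]
    rw [List.getElem?_map]
    by_cases ht : i < t.length
    · have : (t.drop s.length)[i - s.length]? = some t[i] := by
        rw [List.getElem?_drop]
        have : s.length + (i - s.length) = i := by omega
        rw [this, List.getElem?_eq_getElem ht]
      simp [this, ht, List.getD_eq_getElem?_getD]
    · have : (t.drop s.length)[i - s.length]? = none := by
        rw [List.getElem?_drop]
        exact List.getElem?_eq_none (by omega)
      simp [this, ht]
theorem fold_get (L : List (List String)) (s : List (String × Bool)) (i : Nat) :
    (L.foldl altStep s)[i]? =
      match s[i]? with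
      | some (v, d) => some (v, d || anyDiff L i v)
      | none => (firstAt L i).map (fun v => (v, anyDiff L i v)) := by
  induction L generalizing s with
  | nil =>
    cases hs : s[i]? with
    | none => simp [hs, firstAt]
    | some p => obtain ⟨v, d⟩ := p; simp [hs, anyDiff]
  | cons t L ih =>
    rw [List.foldl_cons, ih, altStep_get]
    cases hs : s[i]? with
    | some p =>
      obtain ⟨v, d⟩ := p
      simp only [anyDiff, List.any_cons, Bool.or_assoc]
    | none =>
      by_cases ht : i < t.length
      · simp only [if_pos ht]
        have hfa : firstAt (t :: L) i = some (t[i]?.getD "") := by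
          simp [firstAt, List.find?_cons_of_pos, ht, List.getD_eq_getElem?_getD]
        have had : anyDiff (t :: L) i (t[i]?.getD "") = anyDiff L i (t[i]?.getD "") := by
          simp [anyDiff, List.getD_eq_getElem?_getD]
        simp [hfa, had]
      · simp only [if_neg ht]
        have hfa : firstAt (t :: L) i = firstAt L i := by
          simp [firstAt, List.find?_cons_of_neg, ht]
        have had : ∀ v, anyDiff (t :: L) i v = anyDiff L i v := by
          intro v; simp [anyDiff, ht]
        simp [hfa, had]
theorem pointwise (h : List String) (rest : List (List String)) (i : Nat) (v : String)
    (hv : firstAt (h :: rest) i = some v) :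
    (∃ t ∈ rest, pyValB t i ≠ pyValB h i) ↔
      (anyDiff (h :: rest) i v = true ∨ ∃ t ∈ h :: rest, t.length ≤ i) := by
  obtain ⟨t0, hfind⟩ : ∃ t0, (h :: rest).find? (fun t => decide (i < t.length)) = some t0 := by
    unfold firstAt at hv
    cases hf : (h :: rest).find? (fun t => decide (i < t.length)) with
    | none => rw [hf] at hv; simp at hv
    | some t0 => exact ⟨t0, rfl⟩
  have ht0mem : t0 ∈ h :: rest := List.mem_of_find?_eq_some hfind
  have ht0len : i < t0.length := by simpa using List.find?_some hfind
  have hveq : t0.getD i "" = v := by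
    unfold firstAt at hv; rw [hfind] at hv; simpa using hv
  have hhead : i < h.length → v = h.getD i "" := by
    intro hh
    rw [List.find?_cons_of_pos (by simpa using hh)] at hfind
    cases hfind; rw [← hveq]
  constructor
  · rintro ⟨t, htm, hne⟩
    by_cases hh : i < h.length
    · by_cases htl : i < t.length
      · left
        refine List.any_eq_true.mpr ⟨t, List.mem_cons_of_mem _ htm, ?_⟩
        simp only [htl, decide_true, Bool.true_and, bne_iff_ne, ne_eq]
        intro hc
        apply hne
        have h1 : t[i] = h[i] := by
          rw [List.getD_eq_getElem t "" htl] at hc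
          have h2 := (hhead hh).symm
          rw [List.getD_eq_getElem h "" hh] at h2
          rw [hc, ← h2]
        simp [pyValB, htl, hh, h1]
      · exact Or.inr ⟨t, List.mem_cons_of_mem _ htm, by omega⟩
    · exact Or.inr ⟨h, List.mem_cons_self, by omega⟩
  · rintro (had | ⟨t, htm, htl⟩)
    · obtain ⟨t, htm, hp⟩ := List.any_eq_true.mp had
      simp only [Bool.and_eq_true, decide_eq_true_eq, bne_iff_ne, ne_eq] at hp
      obtain ⟨htl, hne⟩ := hp
      by_cases hh : i < h.length
      · have htr : t ∈ rest := by
          cases List.mem_cons.mp htm with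
          | inl he => exact absurd (by rw [he]; exact (hhead hh).symm) hne
          | inr hr => exact hr
        refine ⟨t, htr, ?_⟩
        simp only [pyValB, if_pos htl, if_pos hh, ne_eq,
          List.getElem?_eq_getElem htl, List.getElem?_eq_getElem hh, Option.some_inj]
        intro hc
        apply hne
        rw [List.getD_eq_getElem t "" htl, hc, hhead hh, List.getD_eq_getElem h "" hh]
      · have ht0r : t0 ∈ rest := by
          cases List.mem_cons.mp ht0mem with
          | inl he => subst he; omega
          | inr hr => exact hr
        refine ⟨t0, ht0r, ?_⟩
        simp [pyValB, ht0len, hh]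
    · by_cases hh : i < h.length
      · have htr : t ∈ rest := by
          cases List.mem_cons.mp htm with
          | inl he => subst he; omega
          | inr hr => exact hr
        refine ⟨t, htr, ?_⟩
        simp [pyValB, hh, show ¬ i < t.length by omega]
      · have ht0r : t0 ∈ rest := by
          cases List.mem_cons.mp ht0mem with
          | inl he => subst he; omega
          | inr hr => exact hr
        refine ⟨t0, ht0r, ?_⟩
        simp [pyValB, ht0len, hh]
theorem informative_positions_py_eq (token_lists : List (List String)) :
    informative_positions_py token_lists = informative_positions_py_alt token_lists := by
  cases token_lists with
  | nil => rfl
  | cons h rest =>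
    unfold informative_positions_py informative_positions_py_alt
    simp only [if_neg (List.cons_ne_nil h rest)]
    rw [PySem.List.foldl_append_singleton_eq_map, max?_int_lens h rest, PySem.List.pyRange_one]
    rw [PySem.List.foldl_prod_mk
      (f := fun s t => altStep s t)
      (g := fun m t => if t.length < m then t.length else m)]
    simp only [sub_zero, Int.toNat_natCast, List.map_map, List.nil_append]
    set M := (h :: rest).foldl (fun m t => max m t.length) 0 with hM
    set st := (h :: rest).foldl altStep [] with hst
    set mn := (h :: rest).foldl (fun m t => if t.length < m then t.length else m) h.length with hmn
    have hstlen : st.length = M := by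
      rw [hst, fold_length]; rfl
    apply List.ext_getElem?
    intro k
    by_cases hk : k < M
    · -- both sides are defined at k
      have hA : ((List.range M).map ((fun i => decide (1 < PySem.Set.len
            ((h :: rest).foldl (fun s t => PySem.Set.add s (pyValA t i)) PySem.Set.empty))) ∘
            (fun k : Nat => (0 : Int) + ↑k)))[k]? = some (decide (1 < PySem.Set.len
            ((h :: rest).foldl (fun s t => PySem.Set.add s (pyValA t (↑k : Int))) PySem.Set.empty))) := by
        rw [List.getElem?_map, List.getElem?_range hk]
        simp
      have hex : ∃ t ∈ h :: rest, k < t.length := by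
        have := (lt_max_fold (h :: rest) 0 k).mp (hM ▸ hk)
        rcases this with h0 | h1
        · omega
        · exact h1
      obtain ⟨v, hv⟩ : ∃ v, firstAt (h :: rest) k = some v := by
        unfold firstAt
        cases hf : (h :: rest).find? (fun t => decide (k < t.length)) with
        | none =>
          exfalso
          obtain ⟨t, htm, htl⟩ := hex
          have := List.find?_eq_none.mp hf t htm
          simp [htl] at this
        | some t0 => exact ⟨t0.getD k "", rfl⟩
      have hstk : st[k]? = some (v, anyDiff (h :: rest) k v) := by
        rw [hst, fold_get]
        simp [hv]
      have hB : ((PySem.List.enumerate st).map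
          (fun p => p.2.2 || decide ((mn : Int) ≤ p.1)))[k]? =
          some (anyDiff (h :: rest) k v || decide ((mn : Int) ≤ (k : Int))) := by
        rw [List.getElem?_map, PySem.List.getElem?_enumerate, hstk]
        simp
      rw [hA, hB]
      congr 1
      -- A's per-position bool equals B's
      have hfold : (h :: rest).foldl (fun s t => PySem.Set.add s (pyValA t (↑k : Int))) PySem.Set.empty
          = (rest.map (fun t => pyValA t (↑k : Int))).foldl PySem.Set.add [pyValA h (↑k : Int)] := by
        rw [List.foldl_map]; rfl
      rw [Bool.eq_iff_iff]
      simp only [hfold, PySem.Set.len, decide_eq_true_eq, Nat.one_lt_cast, Bool.or_eq_true]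
      rw [one_lt_foldl_add]
      have hmn' : ((mn : Int) ≤ (k : Int)) ↔ ∃ t ∈ h :: rest, t.length ≤ k := by
        rw [Int.ofNat_le]
        rw [hmn, min_fold_le]
        constructor
        · rintro (h0 | h1)
          · exact ⟨h, List.mem_cons_self, h0⟩
          · exact h1
        · intro h1; exact Or.inr h1
      have hmap : (∃ u ∈ rest.map (fun t => pyValA t (↑k : Int)), u ≠ pyValA h (↑k : Int)) ↔
          ∃ t ∈ rest, pyValB t k ≠ pyValB h k := by
        simp only [List.mem_map]
        constructor
        · rintro ⟨u, ⟨t, htm, rfl⟩, hne⟩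
          exact ⟨t, htm, by rw [← pyVal_cast, ← pyVal_cast]; exact hne⟩
        · rintro ⟨t, htm, hne⟩
          exact ⟨pyValA t (↑k : Int), ⟨t, htm, rfl⟩, by rw [pyVal_cast, pyVal_cast]; exact hne⟩
      rw [hmap, pointwise h rest k v hv, hmn']
    · -- both sides are none beyond M
      have hA : ((List.range M).map ((fun i => decide (1 < PySem.Set.len
            ((h :: rest).foldl (fun s t => PySem.Set.add s (pyValA t i)) PySem.Set.empty))) ∘
            (fun k : Nat => (0 : Int) + ↑k)))[k]? = none := by
        rw [List.getElem?_eq_none]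
        simpa using Nat.le_of_not_lt hk
      have hB : ((PySem.List.enumerate st).map
          (fun p => p.2.2 || decide ((mn : Int) ≤ p.1)))[k]? = none := by
        rw [List.getElem?_eq_none]
        simp [PySem.List.length_enumerate, hstlen]
        omega
      rw [hA, hB]

-- ===== VERDICT (by name: the statement is the Claim_ definition above) =====
theorem informative_positions_py_spec : Claim_equal_informative_positions_py := by
  intro token_lists _
  unfold Spec_informative_positions_py
  exact informative_positions_py_eq token_lists
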